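-- pv_equiv track=rewrite | github.com/RasPatrick55-dev/JBRAVO_Screener | scripts/utils/http_alpaca.py | _chunk_symbols
-- ===== SOURCE A (Python) =====
-- from typing import Dict, Iterable, List, Tuple
--
-- def _chunk_symbols(symbols: Iterable[str], batch: int) -> Iterable[List[str]]:
--     batch = max(1, int(batch))
--     cleaned: List[str] = []
--     for sym in symbols:
--         if not sym:
--             continue
--         cleaned.append(str(sym).strip().upper())
--     for start_idx in range(0, len(cleaned), batch):
--         yield cleaned[start_idx : start_idx + batch]
-- ===== SOURCE B (Python) =====
-- from typing import Iterable, List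
--
-- def _chunk_symbols(symbols: Iterable[str], batch: int) -> Iterable[List[str]]:
--     batch = max(1, int(batch))
--     buf: List[str] = []
--     for sym in symbols:
--         if not sym:
--             continue
--         buf.append(str(sym).strip().upper())
--         if len(buf) == batch:
--             yield buf
--             buf = []
--     if buf:
--         yield buf
-- ===== Notes on version B (the rewrite author's own statement) =====
-- stated objective: alternative
-- what changed: Fuses A's two passes (build full cleaned list, then slice it by index range) into a single accumulate-and-emit traversal that keeps only the current buffer and yields it whenever it fills.
import Mathlib
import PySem

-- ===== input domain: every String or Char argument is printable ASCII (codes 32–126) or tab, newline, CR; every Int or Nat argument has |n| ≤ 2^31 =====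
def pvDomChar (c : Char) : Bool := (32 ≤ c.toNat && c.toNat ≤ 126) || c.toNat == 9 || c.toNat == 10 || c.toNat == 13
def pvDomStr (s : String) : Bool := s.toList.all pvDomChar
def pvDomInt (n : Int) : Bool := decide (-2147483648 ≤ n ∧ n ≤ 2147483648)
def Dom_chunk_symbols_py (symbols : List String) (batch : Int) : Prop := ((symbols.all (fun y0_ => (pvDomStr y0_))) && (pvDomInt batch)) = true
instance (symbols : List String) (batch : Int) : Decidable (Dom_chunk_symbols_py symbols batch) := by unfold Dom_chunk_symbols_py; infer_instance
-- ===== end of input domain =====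

-- B fuses A's two passes (clean everything, then slice by index range) into one
-- buffer-accumulate-and-emit traversal; same cost, different decomposition.


-- ===== PORT A =====
-- str(sym).strip().upper()
def pvClean (s : String) : String := PySem.Str.upper (PySem.Str.strip s)

def chunk_symbols_py (symbols : List String) (batch : Int) : List (List String) :=
  let b : Int := max 1 batch
  let cleaned : List String :=
    symbols.foldl (fun acc sym => if sym = "" then acc else acc ++ [pvClean sym]) []
  (PySem.List.pyRange 0 (cleaned.length : Int) b).map
    (fun startIdx => PySem.List.slice cleaned (some startIdx) (some (startIdx + b)))

-- ===== PORT B =====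
-- the generator loop of Source B: buffer of cleaned symbols, emitted each time it fills
def pvChunkB (b : Int) (buf : List String) : List String → List (List String)
  | [] => if buf = [] then [] else [buf]
  | sym :: rest =>
      if sym = "" then pvChunkB b buf rest
      else
        let buf' := buf ++ [pvClean sym]
        if (buf'.length : Int) = b then buf' :: pvChunkB b [] rest
        else pvChunkB b buf' rest

def chunk_symbols_py_alt (symbols : List String) (batch : Int) : List (List String) :=
  pvChunkB (max 1 batch) [] symbols

-- ===== PRECONDITION & SPEC =====
def Spec_chunk_symbols_py (symbols : List String) (batch : Int) (out : List (List String)) : Prop := out = chunk_symbols_py_alt symbols batch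
instance (symbols : List String) (batch : Int) (out : List (List String)) : Decidable (Spec_chunk_symbols_py symbols batch out) := by unfold Spec_chunk_symbols_py; infer_instance

-- ===== CLAIM (what is proved, stated in full; the proofs are below) =====
def Claim_equal_chunk_symbols_py : Prop := ∀ (symbols : List String) (batch : Int), Dom_chunk_symbols_py symbols batch → Spec_chunk_symbols_py symbols batch (chunk_symbols_py symbols batch)

-- ===== LEMMAS AND PROOFS =====

-- the cleaned list both programs conceptually traverse
def pvCleaned : List String → List String
  | [] => []
  | s :: r => if s = "" then pvCleaned r else pvClean s :: pvCleaned r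

-- B's loop on an already-cleaned list (no filtering)
def pvPlain (bn : Nat) (buf : List String) : List String → List (List String)
  | [] => if buf = [] then [] else [buf]
  | x :: rest =>
      if (buf ++ [x]).length = bn then (buf ++ [x]) :: pvPlain bn [] rest
      else pvPlain bn (buf ++ [x]) rest

-- chunking by repeated take/drop (proof-side reference shape)
def pvChunksTD (bn : Nat) : List String → List (List String)
  | [] => []
  | x :: xs => (x :: xs).take bn :: pvChunksTD bn (xs.drop (bn - 1))
  termination_by l => l.length
  decreasing_by simp

lemma pvCleanA_eq (l : List String) (acc : List String) :
    l.foldl (fun acc sym => if sym = "" then acc else acc ++ [pvClean sym]) acc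
      = acc ++ pvCleaned l := by
  induction l generalizing acc with
  | nil => simp [pvCleaned]
  | cons s r ih =>
      by_cases h : s = "" <;> simp [pvCleaned, h, ih]

lemma pvChunkB_eq (bn : Nat) (l : List String) (buf : List String) :
    pvChunkB (bn : Int) buf l = pvPlain bn buf (pvCleaned l) := by
  induction l generalizing buf with
  | nil => simp [pvChunkB, pvPlain, pvCleaned]
  | cons s r ih =>
      by_cases h : s = ""
      · simp [pvChunkB, pvCleaned, h, ih]
      · simp [pvChunkB, pvPlain, pvCleaned, h, ih,
          show ((buf.length : Int) + 1 = (bn : Int)) ↔ (buf.length + 1 = bn) from by omega]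

lemma pvPlain_eq (bn : Nat) (hb : 1 ≤ bn) (l buf : List String)
    (h : buf.length < bn) : pvPlain bn buf l = pvChunksTD bn (buf ++ l) := by
  induction l generalizing buf with
  | nil =>
      by_cases hbuf : buf = []
      · subst hbuf
        simp only [List.append_nil]
        rw [pvChunksTD]
        simp [pvPlain]
      · obtain ⟨x, xs, rfl⟩ := List.exists_cons_of_ne_nil hbuf
        simp only [pvPlain, if_neg hbuf, List.append_nil]
        rw [pvChunksTD]
        have h1 : (x :: xs).take bn = x :: xs :=
          List.take_of_length_le (by simpa using Nat.le_of_lt h)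
        have h2 : xs.drop (bn - 1) = [] := by
          apply List.drop_eq_nil_of_le; simp at h ⊢; omega
        rw [h1, h2, pvChunksTD]
  | cons y rest ih =>
      by_cases hlen : (buf ++ [y]).length = bn
      · have hbl : buf.length + 1 = bn := by simpa using hlen
        simp only [pvPlain, if_pos hlen]
        have heq : buf ++ y :: rest = (buf ++ [y]) ++ rest := by simp
        have hstep : pvChunksTD bn (buf ++ y :: rest) = (buf ++ [y]) :: pvChunksTD bn rest := by
          obtain ⟨z, zs, hz⟩ :=
            List.exists_cons_of_ne_nil (show buf ++ y :: rest ≠ [] by simp)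
          have htake : (z :: zs).take bn = buf ++ [y] := by
            rw [← hz, heq, List.take_left' hlen]
          have hdrop : zs.drop (bn - 1) = rest := by
            have hd : (z :: zs).drop bn = zs.drop (bn - 1) := by
              rw [show bn = (bn - 1) + 1 from by omega]; simp
            rw [← hd, ← hz, heq, List.drop_left' hlen]
          rw [hz, pvChunksTD, htake, hdrop]
        rw [hstep, ih [] (by simpa using hb)]
        simp
      · simp only [pvPlain, if_neg hlen]
        have hlt : (buf ++ [y]).length < bn := by
          simp only [List.length_append, List.length_cons, List.length_nil] at hlen ⊢
          omega
        rw [ih (buf ++ [y]) hlt]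
        simp

-- ceiling count used by range(0, n, bn)
lemma pvCount_succ (bn n : Nat) (hb : 1 ≤ bn) (hn : 1 ≤ n) :
    (n + bn - 1) / bn = (n - bn + bn - 1) / bn + 1 := by
  by_cases h : n ≤ bn
  · have h2 : n - bn = 0 := by omega
    rw [show n + bn - 1 = (n - 1) + bn from by omega, Nat.add_div_right _ (by omega),
      Nat.div_eq_of_lt (show n - 1 < bn by omega), h2,
      show 0 + bn - 1 = bn - 1 from by omega,
      Nat.div_eq_of_lt (show bn - 1 < bn by omega)]
  · have hL : (n - 1) / bn = (n - 1 - bn) / bn + 1 := by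
      conv_lhs => rw [show n - 1 = (n - 1 - bn) + bn from by omega]
      rw [Nat.add_div_right _ (by omega)]
    rw [show n + bn - 1 = (n - 1) + bn from by omega, Nat.add_div_right _ (by omega),
      show n - bn + bn - 1 = (n - 1 - bn) + bn from by omega,
      Nat.add_div_right _ (by omega), hL]

lemma pvRangeChunk (bn : Nat) (hb : 1 ≤ bn) :
    ∀ n (l : List String), l.length = n →
      (List.range (if 0 < n then (n + bn - 1) / bn else 0)).map
        (fun k => (l.drop (bn * k)).take bn) = pvChunksTD bn l := by
  intro n
  induction n using Nat.strong_induction_on with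
  | _ n ih =>
      intro l hl
      match l with
      | [] => simp at hl; subst hl; rw [pvChunksTD]; simp
      | x :: xs =>
          have hn : 0 < n := by simp at hl; omega
          rw [if_pos hn, pvCount_succ bn n hb hn, List.range_succ_eq_map, List.map_cons,
            List.map_map]
          have hd : (x :: xs).drop bn = xs.drop (bn - 1) := by
            rw [show bn = (bn - 1) + 1 from by omega]; simp
          have htail :
              (List.range (if 0 < n - bn then (n - bn + bn - 1) / bn else 0)).map
                (fun k => (((x :: xs).drop bn).drop (bn * k)).take bn)
                = pvChunksTD bn (xs.drop (bn - 1)) := by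
            rw [hd]
            exact ih (n - bn) (by omega) _ (by simp at hl ⊢; omega)
          have hcount : (if 0 < n - bn then (n - bn + bn - 1) / bn else 0)
              = (n - bn + bn - 1) / bn := by
            by_cases h : 0 < n - bn
            · rw [if_pos h]
            · rw [if_neg h, show n - bn = 0 from by omega,
                show 0 + bn - 1 = bn - 1 from by omega,
                Nat.div_eq_of_lt (show bn - 1 < bn by omega)]
          rw [pvChunksTD, ← htail, hcount]
          congr 1
          refine List.map_congr_left fun a ha => ?_
          simp only [Function.comp_apply, List.drop_drop]
          congr 2
          rw [Nat.mul_succ]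
          omega

lemma pvA_eq (bn : Nat) (hb : 1 ≤ bn) (l : List String) :
    (PySem.List.pyRange 0 (l.length : Int) (bn : Int)).map
      (fun i => PySem.List.slice l (some i) (some (i + (bn : Int))))
      = pvChunksTD bn l := by
  rw [PySem.List.pyRange_of_pos 0 (l.length : Int) (by exact_mod_cast hb), List.map_map]
  have hcount : (if (0 : Int) < (l.length : Int)
        then (((l.length : Int) - 0 + (bn : Int) - 1) / (bn : Int)).toNat else 0)
      = (if 0 < l.length then (l.length + bn - 1) / bn else 0) := by
    by_cases h : 0 < l.length
    · rw [if_pos (by exact_mod_cast h), if_pos h]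
      have : ((l.length : Int) - 0 + (bn : Int) - 1) = ((l.length + bn - 1 : Nat) : Int) := by
        omega
      rw [this]; norm_cast
    · rw [if_neg (by exact_mod_cast h), if_neg h]
  rw [hcount, ← pvRangeChunk bn hb l.length l rfl]
  apply List.map_congr_left
  intro k _
  simp only [Function.comp]
  have h1 : (0 : Int) + (bn : Int) * (k : Int) = ((bn * k : Nat) : Int) := by push_cast; ring
  rw [h1, PySem.List.slice_natCast_add l (bn * k) bn]

-- ===== VERDICT (by name: the statement is the Claim_ definition above) =====
theorem chunk_symbols_py_spec : Claim_equal_chunk_symbols_py := by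
  intro symbols batch _
  unfold Spec_chunk_symbols_py chunk_symbols_py chunk_symbols_py_alt
  set b : Int := max 1 batch with hbdef
  have hb1 : 1 ≤ b := le_max_left _ _
  set bn : Nat := b.toNat with hbn
  have hcast : (bn : Int) = b := by omega
  have hbn1 : 1 ≤ bn := by omega
  rw [pvCleanA_eq symbols []]
  simp only [List.nil_append]
  rw [← hcast, pvA_eq bn hbn1 (pvCleaned symbols), pvChunkB_eq bn symbols [],
    pvPlain_eq bn hbn1 (pvCleaned symbols) [] (by simpa using hbn1)]
  simp
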